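-- pv_equiv track=rewrite | github.com/jonathanmelitski/streamside-backend | functions/main.py | _merge_streams
-- ===== SOURCE A (Python) =====
-- def _merge_streams(nhd_features: list, dec_features: list) -> list:
--     nhd_by_name: dict[str, list] = {}
--     for f in nhd_features:
--         name = (f["properties"].get("name") or "").lower().strip()
--         if name:
--             nhd_by_name.setdefault(name, []).append(f)
--
--     unmatched = []
--     for dec_f in dec_features:
--         name = (dec_f["properties"].get("name") or "").lower().strip()
--         if name in nhd_by_name:
--             dec_props = {k: v for k, v in dec_f["properties"].items() if k.startswith("dec_")}
--             for nhd_f in nhd_by_name[name]: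
--                 nhd_f["properties"].update(dec_props)
--                 nhd_f["properties"]["source"] = "nhd_plus+dec"
--         else:
--             unmatched.append(dec_f)
--
--     return nhd_features + unmatched
-- ===== SOURCE B (Python) =====
-- def _merge_streams(nhd_features: list, dec_features: list) -> list:
--     def norm(f):
--         return (f["properties"].get("name") or "").lower().strip()
--
--     # per-name overlay: merged dec_-prefixed props of all dec features with that name, plus the source marker
--     dec_by_name: dict[str, dict] = {}
--     for d in dec_features:
--         name = norm(d)
--         if name:
--             ov = dec_by_name.setdefault(name, {})
--             ov.update((k, v) for k, v in d["properties"].items() if k.startswith("dec_"))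
--             ov["source"] = "nhd_plus+dec"
--
--     nhd_names = {norm(f) for f in nhd_features if norm(f)}
--
--     merged = [
--         {**f, "properties": {**f["properties"], **dec_by_name[norm(f)]}}
--         if norm(f) in dec_by_name else f
--         for f in nhd_features
--     ]
--     unmatched = [d for d in dec_features if norm(d) not in nhd_names]
--     return merged + unmatched
-- ===== Notes on version B (the rewrite author's own statement) =====
-- stated objective: alternative
-- what changed: A builds a name->feature-reference index and mutates matched nhd features in place once per dec feature while collecting unmatched in the same loop; B instead precomputes a per-name overlay table (dec_ props of all same-named dec features merged in dec order, plus the source marker), applies it in one functional map over nhd_features, and selects unmatched dec features by a separate filter; B does not mutate its arguments (A does), the return value is identical.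
import Mathlib
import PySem

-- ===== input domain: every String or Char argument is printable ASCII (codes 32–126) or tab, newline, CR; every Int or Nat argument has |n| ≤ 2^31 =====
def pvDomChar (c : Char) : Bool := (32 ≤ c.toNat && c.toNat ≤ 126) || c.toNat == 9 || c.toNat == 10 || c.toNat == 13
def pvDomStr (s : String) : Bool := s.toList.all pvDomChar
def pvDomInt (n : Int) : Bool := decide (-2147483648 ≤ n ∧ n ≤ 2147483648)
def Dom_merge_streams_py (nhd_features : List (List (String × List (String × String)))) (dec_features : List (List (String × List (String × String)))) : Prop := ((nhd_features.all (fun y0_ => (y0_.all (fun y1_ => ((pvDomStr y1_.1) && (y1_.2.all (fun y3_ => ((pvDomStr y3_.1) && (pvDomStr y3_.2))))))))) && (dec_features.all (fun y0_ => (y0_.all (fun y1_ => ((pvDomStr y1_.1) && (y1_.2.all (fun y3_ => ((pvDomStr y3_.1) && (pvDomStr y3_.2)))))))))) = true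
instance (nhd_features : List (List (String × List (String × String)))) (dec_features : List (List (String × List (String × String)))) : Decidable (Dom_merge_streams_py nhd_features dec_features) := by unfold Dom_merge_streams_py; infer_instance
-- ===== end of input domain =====

-- B replaces A's in-place mutation join (name → feature references, updated per dec feature) by a
-- precomputed per-name overlay table applied in one functional map over nhd_features (objective:
-- alternative decomposition, same asymptotic cost). A mutates the nhd feature dicts in place, B does
-- not; the equivalence proved here is about the RETURN value only.

-- a feature: a dict str → dict str str, as an association list
abbrev PvFeat := List (String × List (String × String))

-- f["properties"]  (Pre_ guarantees the key is present; the .getD [] default is never reached there)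
def pvProps (f : PvFeat) : List (String × String) :=
  ((PySem.Dict.mk f).get? "properties").getD []

-- (f["properties"].get("name") or "").lower().strip()
def pvName (f : PvFeat) : String :=
  PySem.Str.strip (PySem.Str.lower (((PySem.Dict.mk (pvProps f)).get? "name").getD ""))

def pvSrc : String := "nhd_plus+dec"

-- ===== PORT A =====

-- {k: v for k, v in dec_f["properties"].items() if k.startswith("dec_")}
def pvDecProps (f : PvFeat) : PySem.Dict String String :=
  (pvProps f).foldl
    (fun d p => if PySem.Str.startswith p.1 "dec_" then d.insert p.1 p.2 else d)
    PySem.Dict.empty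

-- nhd_f["properties"].update(dec_props); nhd_f["properties"]["source"] = "nhd_plus+dec"
-- (mutation of the feature object, value-level: replace its "properties" entry)
def pvApplyDec (dp : PySem.Dict String String) (f : PvFeat) : PvFeat :=
  ((PySem.Dict.mk f).insert "properties"
    (((PySem.Dict.mk (pvProps f)).update dp.items).insert "source" pvSrc).items).items

def merge_streams_py (nhd_features : List (List (String × List (String × String)))) (dec_features : List (List (String × List (String × String)))) : List (List (String × List (String × String))) :=
  -- nhd_by_name: dict name → list of references into nhd_features (indices)
  let nhd_by_name : PySem.Dict String (List Nat) :=
    nhd_features.zipIdx.foldl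
      (fun d p => if pvName p.1 ≠ "" then d.modify (pvName p.1) [] (· ++ [p.2]) else d)
      PySem.Dict.empty
  let st := dec_features.foldl
    (fun (st : List PvFeat × List PvFeat) dec_f =>
      if nhd_by_name.contains (pvName dec_f) then
        let dp := pvDecProps dec_f
        ((nhd_by_name.getD (pvName dec_f) []).foldl
            (fun arr i => arr.modify i (pvApplyDec dp)) st.1,
         st.2)
      else (st.1, st.2 ++ [dec_f]))
    (nhd_features, [])
  st.1 ++ st.2

-- ===== PORT B =====

-- the dec_-prefixed items of f["properties"]
def pvDecItems (f : PvFeat) : List (String × String) :=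
  (pvProps f).filter (fun p => PySem.Str.startswith p.1 "dec_")

def merge_streams_py_alt (nhd_features : List (List (String × List (String × String)))) (dec_features : List (List (String × List (String × String)))) : List (List (String × List (String × String))) :=
  -- dec_by_name: name → merged dec_ props of all dec features with that name, plus the source marker
  let dec_by_name : PySem.Dict String (PySem.Dict String String) :=
    dec_features.foldl
      (fun t f =>
        if pvName f ≠ "" then
          t.insert (pvName f)
            (((t.getD (pvName f) PySem.Dict.empty).update (pvDecItems f)).insert "source" pvSrc)
        else t)
      PySem.Dict.empty
  let nhd_names : PySem.Set String :=
    PySem.Set.ofList ((nhd_features.filter (fun f => pvName f ≠ "")).map pvName)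
  let merged := nhd_features.map (fun f =>
    match dec_by_name.get? (pvName f) with
    | some ov =>
        ((PySem.Dict.mk f).insert "properties"
          ((PySem.Dict.mk (pvProps f)).update ov.items).items).items
    | none => f)
  let unmatched := dec_features.filter (fun f => !(PySem.Set.contains nhd_names (pvName f)))
  merged ++ unmatched

-- ===== PRECONDITION & SPEC =====
-- Pre_ excludes exactly the inputs on which the Python raises KeyError: a feature without a
-- "properties" key (f["properties"] in A; B raises there as well).
def Pre_merge_streams_py (nhd_features : List (List (String × List (String × String)))) (dec_features : List (List (String × List (String × String)))) : Prop :=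
  ∀ f ∈ nhd_features ++ dec_features, (PySem.Dict.mk f).contains "properties" = true
instance (nhd_features : List (List (String × List (String × String)))) (dec_features : List (List (String × List (String × String)))) : Decidable (Pre_merge_streams_py nhd_features dec_features) := by unfold Pre_merge_streams_py; infer_instance

def pvWitness_merge_streams_py : (List (List (String × List (String × String)))) × (List (List (String × List (String × String)))) :=
  ([[("properties", [("name", "Rock Creek"), ("ftype", "stream")])]],
   [[("properties", [("name", " rock creek"), ("dec_class", "A")])],
    [("properties", [("name", "other"), ("dec_class", "B")])]])

def Spec_merge_streams_py (nhd_features : List (List (String × List (String × String)))) (dec_features : List (List (String × List (String × String)))) (out : List (List (String × List (String × String)))) : Prop := out = merge_streams_py_alt nhd_features dec_features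
instance (nhd_features : List (List (String × List (String × String)))) (dec_features : List (List (String × List (String × String)))) (out : List (List (String × List (String × String)))) : Decidable (Spec_merge_streams_py nhd_features dec_features out) := by unfold Spec_merge_streams_py; infer_instance

-- ===== CLAIM (what is proved, stated in full; the proofs are below) =====
def Claim_equal_merge_streams_py : Prop := ∀ (nhd_features : List (List (String × List (String × String)))) (dec_features : List (List (String × List (String × String)))), Dom_merge_streams_py nhd_features dec_features → Pre_merge_streams_py nhd_features dec_features → Spec_merge_streams_py nhd_features dec_features (merge_streams_py nhd_features dec_features)

-- ===== LEMMAS AND PROOFS =====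

-- ---- generic list / dict facts specific to the two programs ----

theorem pv_map_self {α : Type} (f : α → α) (l : List α) (h : ∀ x ∈ l, f x = x) :
    l.map f = l := by
  rw [List.map_congr_left h, List.map_id']

theorem pv_mem_items_contains {d : PySem.Dict String String} {a : String} {b : String}
    (h : (a, b) ∈ d.items) : d.contains a = true := by
  have : (PySem.Dict.mk d.items).contains a = d.items.any (fun p => p.1 == a) :=
    PySem.Dict.contains_mk d.items a
  simp only [this]
  exact List.any_eq_true.mpr ⟨(a, b), h, by simp⟩

-- inserting k last instead of at its earlier occurrence gives the same dict, provided no later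
-- insert touches k (the position of k is fixed by the earlier insert either way)
theorem pv_insert_swap {d : PySem.Dict String String} {k k' : String} (hne : k' ≠ k)
    (v w v' : String) :
    ((d.insert k w).insert k' v').insert k v = (d.insert k v).insert k' v' := by
  have hne' : k ≠ k' := fun h => hne h.symm
  apply PySem.Dict.ext
  by_cases hk : d.contains k <;> by_cases hk' : d.contains k' <;>
    simp [PySem.Dict.items_insert, PySem.Dict.contains_insert, hk, hk', hne, hne',
      List.map_map, List.map_append]
  all_goals try (refine pv_map_self _ _ (fun p hp => ?_); have hca := pv_mem_items_contains (a := p.1) (b := p.2) hp; by_cases h1 : p.1 = k <;> simp_all)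
  all_goals (intro a b hmem; have hca := pv_mem_items_contains hmem; by_cases h1 : a = k <;> by_cases h2 : a = k' <;> simp_all)

theorem pv_foldl_ins_insert {t : List (String × String)} {k : String}
    (hk : ∀ p ∈ t, p.1 ≠ k) (v w : String) (d : PySem.Dict String String) :
    t.foldl (fun d p => d.insert p.1 p.2) (d.insert k v) =
      (t.foldl (fun d p => d.insert p.1 p.2) (d.insert k w)).insert k v := by
  induction t generalizing d with
  | nil => simpa using (PySem.Dict.insert_insert_self d k w v).symm
  | cons p t ih =>
    have hp : p.1 ≠ k := hk p (List.mem_cons_self)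
    simp only [List.foldl_cons]
    rw [← pv_insert_swap hp v w p.2,
        ih (fun q hq => hk q (List.mem_cons_of_mem _ hq)) ((d.insert k w).insert p.1 p.2),
        pv_insert_swap hp w w p.2]

theorem pv_update_insert_items_aux (l : List (String × String))
    (hnd : (l.map (·.1)).Nodup) (k v : String) (p : PySem.Dict String String) :
    p.update ((PySem.Dict.mk l).insert k v).items = (p.update l).insert k v := by
  induction l generalizing p with
  | nil =>
    simp [PySem.Dict.items_insert, PySem.Dict.contains_mk, PySem.Dict.update]
  | cons q t ih =>
    simp only [List.map_cons, List.nodup_cons] at hnd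
    by_cases h0 : q.1 = k
    · have hkt : ∀ r ∈ t, r.1 ≠ k := by
        intro r hr he
        exact hnd.1 (h0 ▸ he ▸ List.mem_map_of_mem hr)
      have hc : (PySem.Dict.mk (q :: t)).contains k = true := by
        simp [PySem.Dict.contains_mk, List.any_cons, h0]
      have hitems : ((PySem.Dict.mk (q :: t)).insert k v).items = (k, v) :: t := by
        simp [PySem.Dict.items_insert, hc, h0]
        exact pv_map_self _ _ (fun r hr => by simp [hkt r hr])
      rw [hitems]
      show t.foldl (fun d p => d.insert p.1 p.2) (p.insert k v) =
        (t.foldl (fun d p => d.insert p.1 p.2) (p.insert q.1 q.2)).insert k v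
      rw [h0]
      exact pv_foldl_ins_insert hkt v q.2 p
    · have hitems : ((PySem.Dict.mk (q :: t)).insert k v).items =
          q :: ((PySem.Dict.mk t).insert k v).items := by
        by_cases hct : (PySem.Dict.mk t).contains k <;>
          simp_all [PySem.Dict.items_insert, PySem.Dict.contains_mk, List.any_cons]
      rw [hitems]
      show ((PySem.Dict.mk t).insert k v).items.foldl (fun d p => d.insert p.1 p.2)
          (p.insert q.1 q.2) = (t.foldl (fun d p => d.insert p.1 p.2) (p.insert q.1 q.2)).insert k v
      exact ih hnd.2 (p.insert q.1 q.2)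

-- update with (o.insert k v).items = update with o.items, then insert
theorem pv_update_insert_items (o : PySem.Dict String String) (hnd : o.keys.Nodup)
    (k v : String) (p : PySem.Dict String String) :
    p.update (o.insert k v).items = (p.update o.items).insert k v := by
  obtain ⟨l⟩ := o
  rw [PySem.Dict.keys_mk] at hnd
  exact pv_update_insert_items_aux l hnd k v p

-- update with (o.update l).items = update with o.items, then update with l
theorem pv_update_update_items (l : List (String × String)) (o : PySem.Dict String String)
    (hnd : o.keys.Nodup) (p : PySem.Dict String String) :
    p.update (o.update l).items = (p.update o.items).update l := by
  induction l generalizing o with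
  | nil => rfl
  | cons q t ih =>
    show p.update ((o.insert q.1 q.2).update t).items = ((p.update o.items).insert q.1 q.2).update t
    rw [ih (o.insert q.1 q.2) (PySem.Dict.nodup_keys_insert o q.1 q.2 hnd),
        pv_update_insert_items o hnd q.1 q.2 p]

@[simp] theorem pv_mk_items {κ ν : Type} (d : PySem.Dict κ ν) : PySem.Dict.mk d.items = d := rfl

-- ---- A's per-feature mutation chain vs B's accumulated overlay ----

theorem pv_decProps_eq (f : PvFeat) :
    pvDecProps f = PySem.Dict.empty.update (pvDecItems f) := by
  unfold pvDecProps pvDecItems PySem.Dict.update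
  rw [PySem.List.foldl_ite_eq_foldl_filter
    (p := fun q : String × String => PySem.Str.startswith q.1 "dec_" = true)
    (f := fun (d : PySem.Dict String String) (q : String × String) => d.insert q.1 q.2)]
  simp

theorem pv_update_decProps (f : PvFeat) (p : PySem.Dict String String) :
    p.update (pvDecProps f).items = p.update (pvDecItems f) := by
  rw [pv_decProps_eq,
    pv_update_update_items (pvDecItems f) PySem.Dict.empty PySem.Dict.nodup_keys_empty p]
  rfl

-- the overlay a run of dec features with one name accumulates (B's dec_by_name entry)
def pvOvOf (ds : List PvFeat) : PySem.Dict String String :=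
  ds.foldl (fun o f => (o.update (pvDecItems f)).insert "source" pvSrc) PySem.Dict.empty

theorem pv_foldl_ov_nodup (ds : List PvFeat) (o : PySem.Dict String String)
    (h : o.keys.Nodup) :
    (ds.foldl (fun o f => (o.update (pvDecItems f)).insert "source" pvSrc) o).keys.Nodup := by
  induction ds generalizing o with
  | nil => exact h
  | cons f t ih =>
    exact ih _ (PySem.Dict.nodup_keys_insert _ _ _ (PySem.Dict.nodup_keys_update _ _ h))

theorem pv_ovOf_nodup (ds : List PvFeat) : (pvOvOf ds).keys.Nodup :=
  pv_foldl_ov_nodup ds PySem.Dict.empty PySem.Dict.nodup_keys_empty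

theorem pv_props_apply (f : PvFeat) (X : List (String × String)) :
    pvProps (((PySem.Dict.mk f).insert "properties" X).items) = X := by
  unfold pvProps
  rw [pv_mk_items, PySem.Dict.get?_insert_self]
  rfl

-- A's chain of per-dec mutations of one feature = one update with the accumulated overlay
theorem pv_chain (ds : List PvFeat) (hne : ds ≠ []) (f : PvFeat) :
    ds.foldl (fun x d => pvApplyDec (pvDecProps d) x) f =
      ((PySem.Dict.mk f).insert "properties"
        ((PySem.Dict.mk (pvProps f)).update (pvOvOf ds).items).items).items := by
  induction ds using List.reverseRecOn with
  | nil => exact absurd rfl hne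
  | append_singleton t d ih =>
    rw [List.foldl_append, List.foldl_cons, List.foldl_nil]
    have hstep : pvOvOf (t ++ [d]) = ((pvOvOf t).update (pvDecItems d)).insert "source" pvSrc := by
      unfold pvOvOf
      simp only [List.foldl_append, List.foldl_cons, List.foldl_nil]
    by_cases ht : t = []
    · subst ht
      simp only [List.foldl_nil]
      rw [hstep]
      unfold pvApplyDec
      have h0 : pvOvOf ([] : List PvFeat) = PySem.Dict.empty := rfl
      rw [h0, pv_update_decProps,
        pv_update_insert_items _ (PySem.Dict.nodup_keys_update _ _ PySem.Dict.nodup_keys_empty),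
        pv_update_update_items _ _ PySem.Dict.nodup_keys_empty]
      rfl
    · rw [ih ht]
      unfold pvApplyDec
      rw [pv_props_apply, pv_mk_items, PySem.Dict.insert_insert_self,
        pv_update_decProps, hstep,
        pv_update_insert_items _ (PySem.Dict.nodup_keys_update _ _ (pv_ovOf_nodup t)),
        pv_update_update_items _ _ (pv_ovOf_nodup t)]

-- ---- B's dec_by_name table characterised ----

def pvTblOf (dec : List PvFeat) : PySem.Dict String (PySem.Dict String String) :=
  dec.foldl
    (fun t f =>
      if pvName f ≠ "" then
        t.insert (pvName f)
          (((t.getD (pvName f) PySem.Dict.empty).update (pvDecItems f)).insert "source" pvSrc)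
      else t)
    PySem.Dict.empty

def pvDsOf (dec : List PvFeat) (n : String) : List PvFeat :=
  dec.filter (fun f => pvName f == n)

theorem pv_tbl_get_empty (dec : List PvFeat) : (pvTblOf dec).get? "" = none := by
  induction dec using List.reverseRecOn with
  | nil => exact PySem.Dict.get?_empty ""
  | append_singleton t f ih =>
    unfold pvTblOf at *
    rw [List.foldl_append, List.foldl_cons, List.foldl_nil]
    by_cases h : pvName f ≠ ""
    · rw [if_pos h, PySem.Dict.get?_insert _ _ _ _]
      rw [if_neg (fun he => h he.symm)]
      exact ih
    · rw [if_neg h]; exact ih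

theorem pv_tbl_get (dec : List PvFeat) (n : String) (hn : n ≠ "") :
    (pvTblOf dec).get? n =
      if pvDsOf dec n = [] then none else some (pvOvOf (pvDsOf dec n)) := by
  induction dec using List.reverseRecOn with
  | nil => simp [pvTblOf, pvDsOf, PySem.Dict.get?_empty]
  | append_singleton t f ih =>
    have htbl : pvTblOf (t ++ [f]) =
        (if pvName f ≠ "" then
          (pvTblOf t).insert (pvName f)
            ((((pvTblOf t).getD (pvName f) PySem.Dict.empty).update (pvDecItems f)).insert "source" pvSrc)
        else pvTblOf t) := by
      unfold pvTblOf
      simp only [List.foldl_append, List.foldl_cons, List.foldl_nil]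
    by_cases hf : pvName f = n
    · have hfne : pvName f ≠ "" := by rw [hf]; exact hn
      have hcons : pvDsOf (t ++ [f]) n = pvDsOf t n ++ [f] := by
        unfold pvDsOf
        simp only [List.filter_append, List.filter_cons, List.filter_nil]
        simp [hf]
      have hov : pvOvOf (pvDsOf t n ++ [f]) =
          ((pvOvOf (pvDsOf t n)).update (pvDecItems f)).insert "source" pvSrc := by
        unfold pvOvOf
        simp only [List.foldl_append, List.foldl_cons, List.foldl_nil]
      rw [htbl, if_pos hfne, hf, PySem.Dict.get?_insert, if_pos rfl, hcons,
        if_neg (by simp), hov, PySem.Dict.getD_eq_get?_getD, ih]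
      by_cases hds0 : pvDsOf t n = []
      · rw [if_pos hds0, hds0]; rfl
      · rw [if_neg hds0]; rfl
    · have hsame : pvDsOf (t ++ [f]) n = pvDsOf t n := by
        unfold pvDsOf
        simp only [List.filter_append, List.filter_cons, List.filter_nil]
        simp [hf]
      rw [hsame]
      by_cases hfe : pvName f ≠ ""
      · rw [htbl, if_pos hfe, PySem.Dict.get?_insert, if_neg (fun h => hf h.symm), ih]
      · rw [htbl, if_neg hfe, ih]

-- ---- A's index dict characterised ----

def pvIdxOf (nhd : List PvFeat) : PySem.Dict String (List Nat) :=
  nhd.zipIdx.foldl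
    (fun d p => if pvName p.1 ≠ "" then d.modify (pvName p.1) [] (· ++ [p.2]) else d)
    PySem.Dict.empty

theorem pv_idx_getD (nhd : List PvFeat) (n : String) :
    (pvIdxOf nhd).getD n [] =
      ((nhd.zipIdx.filter (fun p => pvName p.1 != "" && pvName p.1 == n)).map (·.2)) := by
  unfold pvIdxOf
  rw [PySem.List.foldl_ite_eq_foldl_filter
    (p := fun q : PvFeat × Nat => pvName q.1 ≠ "")
    (f := fun (d : PySem.Dict String (List Nat)) (q : PvFeat × Nat) =>
      d.modify (pvName q.1) [] (· ++ [q.2]))]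
  rw [show (List.foldl (fun (d : PySem.Dict String (List Nat)) (q : PvFeat × Nat) =>
      d.modify (pvName q.1) [] (· ++ [q.2])) PySem.Dict.empty
      (nhd.zipIdx.filter (fun x => decide (pvName x.1 ≠ "")))) =
    (List.foldl (fun (d : PySem.Dict String (List Nat)) (q : String × Nat) =>
      d.modify q.1 [] (· ++ [q.2])) PySem.Dict.empty
      ((nhd.zipIdx.filter (fun x => decide (pvName x.1 ≠ ""))).map (fun q => (pvName q.1, q.2))))
    from (List.foldl_map
      (f := fun q : PvFeat × Nat => (pvName q.1, q.2))
      (g := fun (d : PySem.Dict String (List Nat)) (r : String × Nat) => d.modify r.1 [] (· ++ [r.2]))).symm]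
  rw [PySem.Dict.getD_foldl_modify_append]
  rw [PySem.Dict.getD_empty]
  rw [List.filter_map, List.map_map, List.filter_filter]
  rw [List.nil_append]
  refine congrArg _ (List.filter_congr fun x _ => ?_)
  simp [Bool.and_comm, bne, beq_eq_decide]

theorem pv_idx_mem (nhd : List PvFeat) (n : String) (j : Nat) :
    j ∈ (pvIdxOf nhd).getD n [] ↔
      n ≠ "" ∧ ∃ h : j < nhd.length, pvName nhd[j] = n := by
  rw [pv_idx_getD, List.mem_map]
  constructor
  · rintro ⟨p, hp, rfl⟩
    rw [List.mem_filter] at hp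
    obtain ⟨hmem, hcond⟩ := hp
    obtain ⟨c1, c2⟩ := Bool.and_eq_true_iff.mp hcond
    have hz := List.mem_zipIdx (x := p.1) (i := p.2) (by simpa using hmem)
    obtain ⟨-, hlt, hx⟩ := hz
    have hn : pvName p.1 = n := by simpa using c2
    refine ⟨by simp_all [bne], by simpa using hlt, ?_⟩
    have hg : nhd[p.2]'(by simpa using hlt) = p.1 := by simpa using hx.symm
    rw [hg, hn]
  · rintro ⟨hn, hlt, hname⟩
    refine ⟨(nhd[j], j), ?_, rfl⟩
    rw [List.mem_filter]
    constructor
    · have hg : nhd.zipIdx[j]'(by simpa using hlt) = (nhd[j], j) := by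
        simp [List.getElem_zipIdx]
      exact hg ▸ List.getElem_mem _
    · simp [hname, hn, bne]

theorem pv_idx_nodup (nhd : List PvFeat) (n : String) :
    ((pvIdxOf nhd).getD n []).Nodup := by
  rw [pv_idx_getD]
  have hsub : (nhd.zipIdx.filter (fun p => pvName p.1 != "" && pvName p.1 == n)).map (·.2)
      |>.Sublist (nhd.zipIdx.map (·.2)) :=
    List.Sublist.map _ List.filter_sublist
  exact hsub.nodup (by simpa using List.nodup_zipIdx_map_snd nhd)

theorem pv_idx_contains (nhd : List PvFeat) (n : String) :
    (pvIdxOf nhd).contains n = true ↔ n ≠ "" ∧ ∃ f ∈ nhd, pvName f = n := by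
  unfold pvIdxOf
  rw [PySem.List.foldl_ite_eq_foldl_filter
    (p := fun q : PvFeat × Nat => pvName q.1 ≠ "")
    (f := fun (d : PySem.Dict String (List Nat)) (q : PvFeat × Nat) =>
      d.modify (pvName q.1) [] (· ++ [q.2]))]
  rw [show (List.foldl (fun (d : PySem.Dict String (List Nat)) (q : PvFeat × Nat) =>
      d.modify (pvName q.1) [] (· ++ [q.2])) PySem.Dict.empty
      (nhd.zipIdx.filter (fun x => decide (pvName x.1 ≠ "")))) =
    (List.foldl (fun (d : PySem.Dict String (List Nat)) (q : PvFeat × Nat) =>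
      d.modify ((fun r : PvFeat × Nat => pvName r.1) q) [] ((fun (_ : PySem.Dict String (List Nat)) (q : PvFeat × Nat) (x : List Nat) => x ++ [q.2]) d q)) PySem.Dict.empty
      (nhd.zipIdx.filter (fun x => decide (pvName x.1 ≠ "")))) from rfl]
  rw [PySem.Dict.contains_iff_mem_keys, PySem.Dict.keys_foldl_modify_key]
  rw [show PySem.Set.update PySem.Dict.empty.keys
      ((nhd.zipIdx.filter (fun x => decide (pvName x.1 ≠ ""))).map (fun r : PvFeat × Nat => pvName r.1)) =
    PySem.Set.ofList ((nhd.zipIdx.filter (fun x => decide (pvName x.1 ≠ ""))).map (fun r : PvFeat × Nat => pvName r.1)) from rfl]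
  rw [PySem.Set.mem_ofList, List.mem_map]
  constructor
  · rintro ⟨p, hp, rfl⟩
    rw [List.mem_filter] at hp
    obtain ⟨hmem, hcond⟩ := hp
    obtain ⟨-, hlt, hx⟩ := List.mem_zipIdx (x := p.1) (i := p.2) (by simpa using hmem)
    refine ⟨by simpa using hcond, p.1, ?_, rfl⟩
    have := List.getElem_mem (l := nhd) (n := p.2 - 0) (by simpa using hlt)
    rwa [← hx] at this
  · rintro ⟨hn, f, hf, rfl⟩
    obtain ⟨j, hj, rfl⟩ := List.mem_iff_getElem.mp hf
    refine ⟨(nhd[j], j), ?_, rfl⟩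
    rw [List.mem_filter]
    refine ⟨?_, by simpa using hn⟩
    have hg : nhd.zipIdx[j]'(by simpa using hj) = (nhd[j], j) := by
      simp [List.getElem_zipIdx]
    exact hg ▸ List.getElem_mem _

-- B's nhd_names set characterised
theorem pv_names_contains (nhd : List PvFeat) (n : String) :
    PySem.Set.contains
      (PySem.Set.ofList ((nhd.filter (fun f => pvName f ≠ "")).map pvName)) n = true ↔
      n ≠ "" ∧ ∃ f ∈ nhd, pvName f = n := by
  rw [PySem.Set.contains_iff, PySem.Set.mem_ofList, List.mem_map]
  constructor
  · rintro ⟨f, hf, rfl⟩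
    rw [List.mem_filter] at hf
    exact ⟨by simpa using hf.2, f, hf.1, rfl⟩
  · rintro ⟨hn, f, hf, rfl⟩
    exact ⟨f, List.mem_filter.mpr ⟨hf, by simpa using hn⟩, rfl⟩

-- ---- the mutation loops, per index ----

theorem pv_modifyFold_length (il : List Nat) (g : PvFeat → PvFeat) (a : List PvFeat) :
    (il.foldl (fun arr i => arr.modify i g) a).length = a.length := by
  induction il generalizing a with
  | nil => rfl
  | cons i t ih => rw [List.foldl_cons, ih, List.length_modify]

theorem pv_modifyFold_get (il : List Nat) (hil : il.Nodup) (g : PvFeat → PvFeat)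
    (a : List PvFeat) (j : Nat) (h : j < a.length)
    (h' : j < (il.foldl (fun arr i => arr.modify i g) a).length) :
    (il.foldl (fun arr i => arr.modify i g) a)[j] =
      if j ∈ il then g a[j] else a[j] := by
  induction il generalizing a with
  | nil => rfl
  | cons i t ih =>
    simp only [List.foldl_cons]
    rw [ih hil.of_cons (a.modify i g) (by rwa [List.length_modify])]
    by_cases hji : j ∈ t
    · rw [if_pos hji, if_pos (List.mem_cons_of_mem _ hji)]
      have hij : i ≠ j := fun he => (List.nodup_cons.mp hil).1 (he ▸ hji)
      rw [List.getElem_modify, if_neg hij]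
    · by_cases hji2 : j = i
      · subst hji2
        rw [if_neg hji, if_pos List.mem_cons_self, List.getElem_modify, if_pos rfl]
      · rw [if_neg hji, if_neg (by simp [hji, fun h => hji2 h])]
        rw [List.getElem_modify, if_neg (fun he => hji2 he.symm)]

-- the two components of A's dec loop
def pvStepA (nhd : List PvFeat) (a : List PvFeat) (f : PvFeat) : List PvFeat :=
  if (pvIdxOf nhd).contains (pvName f) then
    ((pvIdxOf nhd).getD (pvName f) []).foldl
      (fun arr i => arr.modify i (pvApplyDec (pvDecProps f))) a
  else a

def pvStepU (nhd : List PvFeat) (u : List PvFeat) (f : PvFeat) : List PvFeat :=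
  if (pvIdxOf nhd).contains (pvName f) then u else u ++ [f]

theorem pv_stepA_length (nhd : List PvFeat) (a : List PvFeat) (f : PvFeat) :
    (pvStepA nhd a f).length = a.length := by
  unfold pvStepA
  by_cases h : (pvIdxOf nhd).contains (pvName f) = true
  · rw [if_pos h, pv_modifyFold_length]
  · rw [if_neg h]

theorem pv_arrFold_length (nhd : List PvFeat) (dec : List PvFeat) (a : List PvFeat) :
    (dec.foldl (pvStepA nhd) a).length = a.length := by
  induction dec generalizing a with
  | nil => rfl
  | cons f t ih => rw [List.foldl_cons, ih, pv_stepA_length]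

theorem pv_stepA_get (nhd : List PvFeat) (a : List PvFeat) (f : PvFeat) (j : Nat)
    (h : j < a.length) (h' : j < (pvStepA nhd a f).length) :
    (pvStepA nhd a f)[j] =
      if j ∈ (pvIdxOf nhd).getD (pvName f) [] then pvApplyDec (pvDecProps f) a[j] else a[j] := by
  by_cases hc : (pvIdxOf nhd).contains (pvName f) = true
  · have he : pvStepA nhd a f =
        ((pvIdxOf nhd).getD (pvName f) []).foldl
          (fun arr i => arr.modify i (pvApplyDec (pvDecProps f))) a := by
      unfold pvStepA; rw [if_pos hc]
    rw [List.getElem_of_eq he]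
    exact pv_modifyFold_get _ (pv_idx_nodup nhd _) _ a j h
      (by rwa [pv_modifyFold_length])
  · have hnil : (pvIdxOf nhd).getD (pvName f) [] = [] :=
      PySem.Dict.getD_of_not_contains _ _ (by simpa using hc)
    have he : pvStepA nhd a f = a := by unfold pvStepA; rw [if_neg hc]
    rw [List.getElem_of_eq he, hnil]
    simp

theorem pv_arrFold_get (nhd : List PvFeat) (dec : List PvFeat) (a : List PvFeat) (j : Nat)
    (h : j < a.length) (h' : j < (dec.foldl (pvStepA nhd) a).length) :
    (dec.foldl (pvStepA nhd) a)[j] =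
      (dec.filter (fun f => decide (j ∈ (pvIdxOf nhd).getD (pvName f) []))).foldl
        (fun x f => pvApplyDec (pvDecProps f) x) a[j] := by
  induction dec generalizing a with
  | nil => rfl
  | cons f t ih =>
    simp only [List.foldl_cons, List.filter_cons]
    rw [ih (pvStepA nhd a f) (by rwa [pv_stepA_length])]
    by_cases hj : j ∈ (pvIdxOf nhd).getD (pvName f) []
    · rw [if_pos (by simpa using hj), List.foldl_cons,
        pv_stepA_get nhd a f j h (by rwa [pv_stepA_length]), if_pos hj]
    · rw [if_neg (by simpa using hj),
        pv_stepA_get nhd a f j h (by rwa [pv_stepA_length]), if_neg hj]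

theorem pv_arr_eq (nhd dec : List PvFeat) :
    dec.foldl (pvStepA nhd) nhd =
      nhd.map (fun f =>
        match (pvTblOf dec).get? (pvName f) with
        | some ov =>
            ((PySem.Dict.mk f).insert "properties"
              ((PySem.Dict.mk (pvProps f)).update ov.items).items).items
        | none => f) := by
  apply List.ext_getElem
  · rw [pv_arrFold_length, List.length_map]
  intro j hj1 hj2
  have hjn : j < nhd.length := by rwa [pv_arrFold_length] at hj1
  rw [List.getElem_map, pv_arrFold_get nhd dec nhd j hjn]
  by_cases hn : pvName nhd[j] = ""
  · have hfilt : dec.filter (fun f => decide (j ∈ (pvIdxOf nhd).getD (pvName f) [])) = [] := by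
      rw [List.filter_eq_nil_iff]
      intro f _ hc
      obtain ⟨hne, hlt2, hname⟩ := (pv_idx_mem nhd (pvName f) j).mp (by simpa using hc)
      exact hne (by rw [← hname]; exact hn)
    have hnone : (pvTblOf dec).get? (pvName nhd[j]) = none := hn ▸ pv_tbl_get_empty dec
    rw [hfilt, List.foldl_nil, hnone]
  · have hfilt : dec.filter (fun f => decide (j ∈ (pvIdxOf nhd).getD (pvName f) [])) =
        pvDsOf dec (pvName nhd[j]) := by
      unfold pvDsOf
      refine List.filter_congr fun f _ => ?_
      rw [show (pvName f == pvName nhd[j]) = decide (pvName f = pvName nhd[j]) from by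
        simp [beq_eq_decide], decide_eq_decide]
      rw [pv_idx_mem]
      constructor
      · rintro ⟨h1, h2, hname⟩; exact hname.symm
      · rintro hname
        exact ⟨by rw [hname]; exact hn, hjn, hname.symm⟩
    rw [hfilt, pv_tbl_get dec (pvName nhd[j]) hn]
    by_cases hds : pvDsOf dec (pvName nhd[j]) = []
    · rw [if_pos hds, hds, List.foldl_nil]
    · rw [if_neg hds, pv_chain _ hds]

theorem pv_um_eq (nhd dec : List PvFeat) :
    dec.foldl (pvStepU nhd) [] =
      dec.filter (fun f =>
        !(PySem.Set.contains
            (PySem.Set.ofList ((nhd.filter (fun f => pvName f ≠ "")).map pvName)) (pvName f))) := by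
  have hswap : (fun (u : List PvFeat) f => pvStepU nhd u f) =
      (fun (u : List PvFeat) f =>
        if ¬ ((pvIdxOf nhd).contains (pvName f) = true) then u ++ [f] else u) := by
    funext u f
    unfold pvStepU
    rw [ite_not]
  rw [show dec.foldl (pvStepU nhd) ([] : List PvFeat) =
      dec.foldl (fun (u : List PvFeat) f =>
        if ¬ ((pvIdxOf nhd).contains (pvName f) = true) then u ++ [f] else u) [] from by rw [← hswap],
    PySem.List.foldl_append_ite_eq_filter
      (p := fun f => ¬ ((pvIdxOf nhd).contains (pvName f) = true)),
    List.nil_append]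
  refine List.filter_congr fun f _ => ?_
  have hiff : (pvIdxOf nhd).contains (pvName f) = true ↔
      PySem.Set.contains
        (PySem.Set.ofList ((nhd.filter (fun f => pvName f ≠ "")).map pvName)) (pvName f) = true :=
    (pv_idx_contains nhd (pvName f)).trans (pv_names_contains nhd (pvName f)).symm
  by_cases hI : (pvIdxOf nhd).contains (pvName f) = true
  · rw [hI, hiff.mp hI]; rfl
  · have hI' : (pvIdxOf nhd).contains (pvName f) = false := by simpa using hI
    have hS' : PySem.Set.contains
        (PySem.Set.ofList ((nhd.filter (fun f => pvName f ≠ "")).map pvName)) (pvName f) = false := by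
      rcases Bool.eq_false_or_eq_true (PySem.Set.contains
        (PySem.Set.ofList ((nhd.filter (fun f => pvName f ≠ "")).map pvName)) (pvName f)) with h | h
      · exact absurd (hiff.mpr h) hI
      · exact h
    rw [hI', hS']; rfl

-- ===== VERDICT (by name: the statement is the Claim_ definition above) =====
theorem merge_streams_py_spec : Claim_equal_merge_streams_py := by
  unfold Claim_equal_merge_streams_py
  intro nhd dec _ _
  unfold Spec_merge_streams_py
  show (dec.foldl
      (fun (st : List PvFeat × List PvFeat) dec_f =>
        if (pvIdxOf nhd).contains (pvName dec_f) then
          (((pvIdxOf nhd).getD (pvName dec_f) []).foldl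
              (fun arr i => arr.modify i (pvApplyDec (pvDecProps dec_f))) st.1,
           st.2)
        else (st.1, st.2 ++ [dec_f])) (nhd, [])).1 ++
      (dec.foldl
      (fun (st : List PvFeat × List PvFeat) dec_f =>
        if (pvIdxOf nhd).contains (pvName dec_f) then
          (((pvIdxOf nhd).getD (pvName dec_f) []).foldl
              (fun arr i => arr.modify i (pvApplyDec (pvDecProps dec_f))) st.1,
           st.2)
        else (st.1, st.2 ++ [dec_f])) (nhd, [])).2 =
    (nhd.map (fun f =>
      match (pvTblOf dec).get? (pvName f) with
      | some ov =>
          ((PySem.Dict.mk f).insert "properties"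
            ((PySem.Dict.mk (pvProps f)).update ov.items).items).items
      | none => f)) ++
    (dec.filter (fun f =>
      !(PySem.Set.contains
          (PySem.Set.ofList ((nhd.filter (fun f => pvName f ≠ "")).map pvName)) (pvName f))))
  have hsplit : (fun (st : List PvFeat × List PvFeat) dec_f =>
        if (pvIdxOf nhd).contains (pvName dec_f) then
          (((pvIdxOf nhd).getD (pvName dec_f) []).foldl
              (fun arr i => arr.modify i (pvApplyDec (pvDecProps dec_f))) st.1,
           st.2)
        else (st.1, st.2 ++ [dec_f])) =
      (fun (st : List PvFeat × List PvFeat) dec_f =>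
        (pvStepA nhd st.1 dec_f, pvStepU nhd st.2 dec_f)) := by
    funext st f
    unfold pvStepA pvStepU
    by_cases h : (pvIdxOf nhd).contains (pvName f) = true <;> simp [h]
  rw [hsplit, PySem.List.foldl_prod_mk]
  exact congrArg₂ (· ++ ·) (pv_arr_eq nhd dec) (pv_um_eq nhd dec)
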